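-- pv_equiv track=rewrite | github.com/terror/solutions | binarysearch/lexicographically-bigger-string.py | solve
-- ===== SOURCE A (Python) =====
-- def solve(s, t):
--   if len(s) != len(t):
--     return False
--
--   s = ''.join(sorted(s))
--   t = ''.join(sorted(t))
--
--   count = 0
--
--   for a, b in zip(s, t):
--     if a > b:
--       count += 1
--       break
--
--   for a, b in zip(s, t):
--     if b > a:
--       count += 1
--       break
--
--   return count < 2
-- ===== SOURCE B (Python) =====
-- def solve(s, t):
--   if len(s) != len(t):
--     return False
--
--   # No sorting at all: tally a signed character histogram, then sweep the
--   # alphabet keeping the running prefix-sum difference.  sorted(s)[i] > sorted(t)[i]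
--   # somewhere  iff  some prefix of the alphabet holds fewer chars of s than of t
--   # (the running difference goes negative), and symmetrically for the other side.
--   diff = [0] * 128
--   for ch in s:
--     diff[ord(ch)] += 1
--   for ch in t:
--     diff[ord(ch)] -= 1
--
--   d = 0
--   pos = neg = False
--   for c in range(128):
--     d += diff[c]
--     if d > 0:
--       pos = True
--     elif d < 0:
--       neg = True
--   return not (pos and neg)
-- ===== Notes on version B (the rewrite author's own statement) =====
-- stated objective: faster
-- what changed: drops sorting entirely: B tallies a signed per-character histogram and sweeps the 128-slot alphabet once, testing the sign of the running prefix-sum difference, which characterises pointwise dominance of the sorted strings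
import Mathlib
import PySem

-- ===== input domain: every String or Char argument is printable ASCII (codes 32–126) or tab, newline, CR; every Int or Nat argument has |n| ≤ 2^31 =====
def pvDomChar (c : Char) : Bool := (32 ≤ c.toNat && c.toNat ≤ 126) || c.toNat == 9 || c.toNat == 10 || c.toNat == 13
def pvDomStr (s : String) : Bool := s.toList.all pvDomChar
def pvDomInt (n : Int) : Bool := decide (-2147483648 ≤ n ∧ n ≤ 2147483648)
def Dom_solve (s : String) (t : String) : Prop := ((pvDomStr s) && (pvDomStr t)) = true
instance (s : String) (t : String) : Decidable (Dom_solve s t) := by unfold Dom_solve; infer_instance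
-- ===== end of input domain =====

-- B drops sorting entirely: it tallies a signed per-character histogram and sweeps the
-- 128-slot alphabet once, testing the sign of the running prefix-sum difference.

-- ===== PORT A =====
-- first 'for a, b in zip(s, t): if a > b: count += 1; break'
def loopGT : List (Char × Char) → Int → Int
  | [], count => count
  | (a, b) :: rest, count => if b < a then count + 1 else loopGT rest count

-- second 'for a, b in zip(s, t): if b > a: count += 1; break'
def loopLT : List (Char × Char) → Int → Int
  | [], count => count
  | (a, b) :: rest, count => if a < b then count + 1 else loopLT rest count

def solve (s : String) (t : String) : Bool :=
  if PySem.Str.len s ≠ PySem.Str.len t then false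
  else
    -- s = ''.join(sorted(s)); t = ''.join(sorted(t)) (kept as the sorted char lists)
    let s' := PySem.List.sorted s.toList (fun c => c) false
    let t' := PySem.List.sorted t.toList (fun c => c) false
    let count := loopGT (s'.zip t') 0
    let count := loopLT (s'.zip t') count
    decide (count < 2)

-- ===== PORT B =====
def solve_alt (s : String) (t : String) : Bool :=
  if PySem.Str.len s ≠ PySem.Str.len t then false
  else
    -- diff = [0]*128; for ch in s: diff[ord(ch)] += 1; for ch in t: diff[ord(ch)] -= 1
    let diff := s.toList.foldl (fun l ch => l.set ch.toNat (l.getD ch.toNat 0 + 1))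
      (List.replicate 128 (0 : Int))
    let diff := t.toList.foldl (fun l ch => l.set ch.toNat (l.getD ch.toNat 0 - 1)) diff
    -- d = 0; pos = neg = False; for c in range(128): d += diff[c]; if d > 0: pos = True elif d < 0: neg = True
    let r := (List.range 128).foldl
      (fun (st : Int × Bool × Bool) c =>
        let d := st.1 + diff.getD c 0
        (d, if 0 < d then true else st.2.1,
            if 0 < d then st.2.2 else if d < 0 then true else st.2.2))
      (0, false, false)
    !(r.2.1 && r.2.2)

-- ===== PRECONDITION & SPEC =====
def Spec_solve (s : String) (t : String) (out : Bool) : Prop := out = solve_alt s t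
instance (s : String) (t : String) (out : Bool) : Decidable (Spec_solve s t out) := by unfold Spec_solve; infer_instance

-- ===== CLAIM (what is proved, stated in full; the proofs are below) =====
def Claim_equal_solve : Prop := ∀ (s : String) (t : String), Dom_solve s t → Spec_solve s t (solve s t)

-- ===== LEMMAS AND PROOFS =====

theorem loopGT_eq (z : List (Char × Char)) (c : Int) :
    loopGT z c = if z.any (fun ab => decide (ab.2 < ab.1)) then c + 1 else c := by
  induction z generalizing c with
  | nil => simp [loopGT]
  | cons ab rest ih =>
    obtain ⟨a, b⟩ := ab
    by_cases h : b < a <;> simp [loopGT, h, ih]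

theorem loopLT_eq (z : List (Char × Char)) (c : Int) :
    loopLT z c = if z.any (fun ab => decide (ab.1 < ab.2)) then c + 1 else c := by
  induction z generalizing c with
  | nil => simp [loopLT]
  | cons ab rest ih =>
    obtain ⟨a, b⟩ := ab
    by_cases h : a < b <;> simp [loopLT, h, ih]

-- pointwise dominance gives countP dominance
theorem countP_mono_forall2 (xs ys : List Char) (c : Nat)
    (h : List.Forall₂ (· ≤ ·) xs ys) :
    ys.countP (fun x => decide (x.toNat ≤ c)) ≤ xs.countP (fun x => decide (x.toNat ≤ c)) := by
  induction h with
  | nil => simp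
  | @cons a b xs ys hab _ ih =>
    rw [List.countP_cons, List.countP_cons]
    by_cases hb : b.toNat ≤ c
    · have ha : a.toNat ≤ c := le_trans hab hb
      simp only [ha, hb, decide_true, if_pos]
      omega
    · by_cases ha : a.toNat ≤ c <;> simp only [ha, hb, decide_true, decide_false] <;> simp <;> omega

-- in a sorted list, positions 0..i all lie at or below the element at i
theorem countP_ge_succ_of_sorted (ys : List Char) (i : Nat) (hiy : i < ys.length)
    (hys : List.Pairwise (· ≤ ·) ys) (b : Char) (hb : ys[i] ≤ b) :
    i + 1 ≤ ys.countP (fun x => decide (x.toNat ≤ b.toNat)) := by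
  have htk : (ys.take (i+1)).countP (fun x => decide (x.toNat ≤ b.toNat))
      = (ys.take (i+1)).length := by
    rw [List.countP_eq_length]
    intro a ha
    obtain ⟨j, hj, hja⟩ := List.mem_iff_getElem.mp ha
    have hj' : j < ys.length := by
      have := hj; rw [List.length_take] at this; omega
    rw [List.getElem_take] at hja
    have hji : j ≤ i := by
      have := hj; rw [List.length_take] at this; omega
    have hle : ys[j] ≤ b := by
      refine le_trans ?_ hb
      rcases Nat.lt_or_ge j i with hlt | _
      · exact (List.pairwise_iff_getElem.mp hys) j i hj' hiy hlt
      · have : j = i := by omega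
        subst this; exact le_refl _
    rw [← hja]
    exact decide_eq_true hle
  have hlt : (ys.take (i+1)).length = i + 1 := by
    rw [List.length_take]; omega
  have hsplit : (ys.take (i+1)).countP (fun x => decide (x.toNat ≤ b.toNat))
      ≤ ys.countP (fun x => decide (x.toNat ≤ b.toNat)) := by
    conv_rhs => rw [← List.take_append_drop (i+1) ys]
    rw [List.countP_append]; omega
  omega

-- in a sorted list, if the element at i exceeds b then at most i elements are ≤ b
theorem countP_le_of_sorted (xs : List Char) (i : Nat) (hix : i < xs.length)
    (hxs : List.Pairwise (· ≤ ·) xs) (b : Char) (hb : b < xs[i]) :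
    xs.countP (fun x => decide (x.toNat ≤ b.toNat)) ≤ i := by
  have hdr : (xs.drop i).countP (fun x => decide (x.toNat ≤ b.toNat)) = 0 := by
    rw [List.countP_eq_zero]
    intro a ha
    obtain ⟨j, hj, hja⟩ := List.mem_iff_getElem.mp ha
    rw [List.getElem_drop] at hja
    have hj' : i + j < xs.length := by
      have := hj; rw [List.length_drop] at this; omega
    have hge : xs[i] ≤ xs[i+j] := by
      rcases Nat.eq_zero_or_pos j with h0 | hpos
      · subst h0; simp
      · exact (List.pairwise_iff_getElem.mp hxs) i (i+j) hix hj' (by omega)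
    have hlt' : b < a := by
      rw [← hja]; exact lt_of_lt_of_le hb hge
    simp only [decide_eq_true_eq]
    have : b.toNat < a.toNat := hlt'
    omega
  have hsplit : xs.countP (fun x => decide (x.toNat ≤ b.toNat))
      = (xs.take i).countP (fun x => decide (x.toNat ≤ b.toNat))
        + (xs.drop i).countP (fun x => decide (x.toNat ≤ b.toNat)) := by
    conv_lhs => rw [← List.take_append_drop i xs]
    rw [List.countP_append]
  have hbound := List.countP_le_length (l := xs.take i)
    (p := fun x => decide (x.toNat ≤ b.toNat))
  rw [List.length_take] at hbound
  omega

-- KEY LEMMA: on sorted equal-length lists of sub-128 characters, 'some position of ys is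
-- smaller than the same position of xs' is the same as 'some alphabet prefix holds more
-- elements of ys than of xs'.
theorem any_gt_eq (xs ys : List Char) (hlen : xs.length = ys.length)
    (hxs : List.Pairwise (· ≤ ·) xs) (hys : List.Pairwise (· ≤ ·) ys)
    (hby : ∀ x ∈ ys, x.toNat < 128) :
    ((xs.zip ys).any (fun ab => decide (ab.2 < ab.1)))
      = decide (∃ c ∈ List.range 128,
          xs.countP (fun x => decide (x.toNat ≤ c)) < ys.countP (fun x => decide (x.toNat ≤ c))) := by
  by_cases h : (xs.zip ys).any (fun ab => decide (ab.2 < ab.1)) = true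
  · rw [h]; symm; rw [decide_eq_true_iff]
    rw [List.any_eq_true] at h
    obtain ⟨p, hp, hpred⟩ := h
    obtain ⟨i, hi, hip⟩ := List.mem_iff_getElem.mp hp
    have hix : i < xs.length := by rw [List.length_zip] at hi; omega
    have hiy : i < ys.length := by rw [List.length_zip] at hi; omega
    rw [← hip, List.getElem_zip] at hpred
    have hba : ys[i] < xs[i] := of_decide_eq_true hpred
    refine ⟨(ys[i]).toNat, List.mem_range.mpr (hby _ (List.getElem_mem hiy)), ?_⟩
    have hyge := countP_ge_succ_of_sorted ys i hiy hys (ys[i]) (le_refl _)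
    have hxle := countP_le_of_sorted xs i hix hxs (ys[i]) hba
    omega
  · rw [Bool.not_eq_true] at h
    rw [h]; symm; rw [decide_eq_false_iff_not]
    rintro ⟨c, _, hc⟩
    rw [List.any_eq_false] at h
    have hf : List.Forall₂ (· ≤ ·) xs ys := by
      rw [List.forall₂_iff_get]
      refine ⟨hlen, ?_⟩
      intro i h1 h2
      have hi : i < (xs.zip ys).length := by rw [List.length_zip]; omega
      have := h ((xs.zip ys)[i]) (List.getElem_mem hi)
      rw [List.getElem_zip] at this
      simp only [decide_eq_true_eq] at this
      simpa using not_lt.mp this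
    exact absurd hc (not_lt.mpr (countP_mono_forall2 xs ys c hf))

-- getD after a set into a 128-slot list
theorem getD_set_128 (l : List Int) (hl : l.length = 128) (c : Nat) (hc : c < 128)
    (j : Nat) (v : Int) :
    ((l.set j v).getD c 0) = if j = c then v else l.getD c 0 := by
  rw [List.getD_eq_getElem?_getD, List.getElem?_set]
  by_cases hjc : j = c
  · simp [hjc, hl, hc]
  · simp [hjc, ← List.getD_eq_getElem?_getD]

theorem tally_length (u : List Char) (f : Int → Int) :
    ∀ (l : List Int),
    (u.foldl (fun l ch => l.set ch.toNat (f (l.getD ch.toNat 0))) l).length = l.length := by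
  induction u with
  | nil => intro l; rfl
  | cons ch rest ih =>
    intro l
    rw [List.foldl_cons, ih]
    exact List.length_set ..

-- histogram fold, increment version
theorem tally_getD_inc (u : List Char) (c : Nat) (hc : c < 128) :
    ∀ (l : List Int), l.length = 128 →
    ((u.foldl (fun l ch => l.set ch.toNat (l.getD ch.toNat 0 + 1)) l).getD c 0)
      = l.getD c 0 + (u.countP (fun x => decide (x.toNat = c)) : Int) := by
  induction u with
  | nil => intro l _; simp
  | cons ch rest ih =>
    intro l hl
    rw [List.foldl_cons, ih _ (by rw [List.length_set]; exact hl), List.countP_cons,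
        getD_set_128 l hl c hc]
    by_cases hch : ch.toNat = c
    · simp only [hch, decide_true, if_pos]
      push_cast
      ring
    · simp [hch]

-- histogram fold, decrement version
theorem tally_getD_dec (u : List Char) (c : Nat) (hc : c < 128) :
    ∀ (l : List Int), l.length = 128 →
    ((u.foldl (fun l ch => l.set ch.toNat (l.getD ch.toNat 0 - 1)) l).getD c 0)
      = l.getD c 0 - (u.countP (fun x => decide (x.toNat = c)) : Int) := by
  induction u with
  | nil => intro l _; simp
  | cons ch rest ih =>
    intro l hl
    rw [List.foldl_cons, ih _ (by rw [List.length_set]; exact hl), List.countP_cons,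
        getD_set_128 l hl c hc]
    by_cases hch : ch.toNat = c
    · simp only [hch, decide_true, if_pos]
      push_cast
      ring
    · simp [hch]

-- the alphabet sweep, characterised: running value and the two sign flags
theorem sweep_eq (diffl : List Int) (n : Nat) :
    (List.range n).foldl
      (fun (st : Int × Bool × Bool) c =>
        let d := st.1 + diffl.getD c 0
        (d, if 0 < d then true else st.2.1,
            if 0 < d then st.2.2 else if d < 0 then true else st.2.2))
      (0, false, false)
    = (((List.range n).map (fun c => diffl.getD c 0)).sum,
       decide (∃ c ∈ List.range n, 0 < ((List.range (c+1)).map (fun j => diffl.getD j 0)).sum),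
       decide (∃ c ∈ List.range n, ((List.range (c+1)).map (fun j => diffl.getD j 0)).sum < 0)) := by
  induction n with
  | zero => simp
  | succ n ih =>
    conv_lhs => rw [List.range_succ]
    rw [List.foldl_append, ih]
    simp only [List.foldl_cons, List.foldl_nil]
    have hsum : ((List.range n).map (fun c => diffl.getD c 0)).sum + diffl.getD n 0
        = ((List.range (n+1)).map (fun j => diffl.getD j 0)).sum := by
      rw [List.range_succ, List.map_append, List.sum_append]; simp
    have hext : ∀ (P : Nat → Prop),
        ((∃ c ∈ List.range (n+1), P c) ↔ (∃ c ∈ List.range n, P c) ∨ P n) := by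
      intro P
      constructor
      · rintro ⟨c, hc, hp⟩
        have hc' := List.mem_range.mp hc
        rcases Nat.lt_or_ge c n with h | h
        · exact Or.inl ⟨c, List.mem_range.mpr h, hp⟩
        · have : c = n := by omega
          subst this; exact Or.inr hp
      · rintro (⟨c, hc, hp⟩ | hp)
        · exact ⟨c, List.mem_range.mpr (by have := List.mem_range.mp hc; omega), hp⟩
        · exact ⟨n, List.mem_range.mpr (by omega), hp⟩
    set Sn := ((List.range (n+1)).map (fun j => diffl.getD j 0)).sum with hSn
    have h1 : ((List.range n).map (fun c => diffl.getD c 0)).sum + diffl.getD n 0 = Sn := hsum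
    rw [Prod.mk.injEq, Prod.mk.injEq]
    refine ⟨h1, ?_, ?_⟩
    · rw [h1]
      by_cases h0 : 0 < Sn
      · rw [if_pos h0]; symm; rw [decide_eq_true_iff, hext]
        exact Or.inr h0
      · rw [if_neg h0, decide_eq_decide, hext]
        constructor
        · exact Or.inl
        · rintro (h | h)
          · exact h
          · exact absurd h h0
    · rw [h1]
      by_cases h0 : 0 < Sn
      · rw [if_pos h0, decide_eq_decide, hext]
        constructor
        · exact Or.inl
        · rintro (h | h)
          · exact h
          · omega
      · rw [if_neg h0]
        by_cases hneg : Sn < 0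
        · rw [if_pos hneg]; symm; rw [decide_eq_true_iff, hext]
          exact Or.inr hneg
        · rw [if_neg hneg, decide_eq_decide, hext]
          constructor
          · exact Or.inl
          · rintro (h | h)
            · exact h
            · exact absurd h hneg

-- counting below m+1 splits off the m-slot
theorem cnt_lt_succ (u : List Char) (m : Nat) :
    u.countP (fun x => decide (x.toNat < m+1))
      = u.countP (fun x => decide (x.toNat < m)) + u.countP (fun x => decide (x.toNat = m)) := by
  induction u with
  | nil => simp
  | cons x rest ih =>
    simp only [List.countP_cons, ih]
    rcases Nat.lt_trichotomy x.toNat m with h | h | h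
    · have h1 : x.toNat < m + 1 := by omega
      have h2 : x.toNat ≠ m := by omega
      simp [h, h1, h2]
      omega
    · simp [h]
      omega
    · have h1 : ¬ x.toNat < m + 1 := by omega
      have h2 : ¬ x.toNat < m := by omega
      have h3 : x.toNat ≠ m := by omega
      simp [h1, h2, h3]

-- the prefix sum of per-slot differences is the difference of below-m counts
theorem prefix_sum_eq (s t : List Char) (m : Nat) :
    ((List.range m).map (fun c =>
        (s.countP (fun x => decide (x.toNat = c)) : Int)
          - (t.countP (fun x => decide (x.toNat = c)) : Int))).sum
      = (s.countP (fun x => decide (x.toNat < m)) : Int)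
          - (t.countP (fun x => decide (x.toNat < m)) : Int) := by
  induction m with
  | zero => simp
  | succ m ih =>
    rw [List.range_succ, List.map_append, List.sum_append, ih, List.map_singleton,
        List.sum_singleton, cnt_lt_succ, cnt_lt_succ]
    push_cast; ring

-- ===== VERDICT (by name: the statement is the Claim_ definition above) =====
theorem solve_spec : Claim_equal_solve := by
  intro s t hdom
  unfold Spec_solve solve solve_alt
  by_cases hlen : PySem.Str.len s ≠ PySem.Str.len t
  · rw [if_pos hlen, if_pos hlen]
  · rw [if_neg hlen, if_neg hlen]
    simp only []
    -- character bound from the domain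
    have hchars : ∀ (w : String), pvDomStr w = true → ∀ x ∈ w.toList, x.toNat < 128 := by
      intro w hw x hx
      have := List.all_eq_true.mp hw x hx
      unfold pvDomChar at this
      simp at this
      omega
    unfold Dom_solve at hdom
    simp only [Bool.and_eq_true] at hdom
    have hbs : ∀ x ∈ s.toList, x.toNat < 128 := hchars s hdom.1
    have hbt : ∀ x ∈ t.toList, x.toNat < 128 := hchars t hdom.2
    have hlen' : s.toList.length = t.toList.length := by
      rw [Decidable.not_not] at hlen
      rw [PySem.Str.len_eq, PySem.Str.len_eq] at hlen
      have h : s.length = t.length := by exact_mod_cast hlen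
      rw [String.length_toList, String.length_toList, h]
    -- the two histogram folds
    set diff1 := s.toList.foldl (fun l ch => l.set ch.toNat (l.getD ch.toNat 0 + 1))
      (List.replicate 128 (0 : Int)) with hdiff1
    set diff2 := t.toList.foldl (fun l ch => l.set ch.toNat (l.getD ch.toNat 0 - 1)) diff1
      with hdiff2
    have hlen1 : diff1.length = 128 := by
      have h := tally_length s.toList (fun v => v + 1) (List.replicate 128 (0 : Int))
      rw [List.length_replicate] at h
      exact h
    have hdval : ∀ c, c < 128 → diff2.getD c 0
        = (s.toList.countP (fun x => decide (x.toNat = c)) : Int)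
            - (t.toList.countP (fun x => decide (x.toNat = c)) : Int) := by
      intro c hc
      rw [hdiff2, tally_getD_dec _ _ hc _ hlen1, hdiff1,
          tally_getD_inc _ _ hc _ (by simp)]
      rw [List.getD_eq_getElem?_getD, List.getElem?_replicate, if_pos hc, Option.getD_some]
      ring
    -- sorted lists
    set s' := PySem.List.sorted s.toList (fun c => c) false with hs'
    set t' := PySem.List.sorted t.toList (fun c => c) false with ht'
    have hps : s'.Perm s.toList := PySem.List.sorted_perm ..
    have hpt : t'.Perm t.toList := PySem.List.sorted_perm ..
    have hlen2 : s'.length = t'.length := by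
      rw [hps.length_eq, hpt.length_eq]; exact hlen'
    have hsortS : List.Pairwise (· ≤ ·) s' := by
      have := PySem.List.sorted_pairwise s.toList (fun c => (c : Char))
      simpa using this
    have hsortT : List.Pairwise (· ≤ ·) t' := by
      have := PySem.List.sorted_pairwise t.toList (fun c => (c : Char))
      simpa using this
    have hbs' : ∀ x ∈ s', x.toNat < 128 := by
      intro x hx; exact hbs x (hps.mem_iff.mp hx)
    have hbt' : ∀ x ∈ t', x.toNat < 128 := by
      intro x hx; exact hbt x (hpt.mem_iff.mp hx)
    -- B side: sweep characterisation, prefix sums as count differences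
    rw [sweep_eq]
    have hpre : ∀ c, c < 128 →
        ((List.range (c+1)).map (fun j => diff2.getD j 0)).sum
          = (s.toList.countP (fun x => decide (x.toNat ≤ c)) : Int)
              - (t.toList.countP (fun x => decide (x.toNat ≤ c)) : Int) := by
      intro c hc
      have hmap : (List.range (c+1)).map (fun j => diff2.getD j 0)
          = (List.range (c+1)).map (fun j =>
              (s.toList.countP (fun x => decide (x.toNat = j)) : Int)
                - (t.toList.countP (fun x => decide (x.toNat = j)) : Int)) := by
        apply List.map_congr_left
        intro j hj
        exact hdval j (by have := List.mem_range.mp hj; omega)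
      rw [hmap, prefix_sum_eq]
      have hcc : ∀ (u : List Char),
          u.countP (fun x => decide (x.toNat < c+1)) = u.countP (fun x => decide (x.toNat ≤ c)) := by
        intro u
        apply List.countP_congr
        intro a _
        simp
      rw [hcc, hcc]
    -- A side: loops as 'any', then the key lemma
    rw [loopGT_eq, loopLT_eq]
    have hg : (s'.zip t').any (fun ab => decide (ab.2 < ab.1))
        = decide (∃ c ∈ List.range 128,
            s'.countP (fun x => decide (x.toNat ≤ c)) < t'.countP (fun x => decide (x.toNat ≤ c))) :=
      any_gt_eq s' t' hlen2 hsortS hsortT hbt'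
    have hl : (s'.zip t').any (fun ab => decide (ab.1 < ab.2))
        = decide (∃ c ∈ List.range 128,
            t'.countP (fun x => decide (x.toNat ≤ c)) < s'.countP (fun x => decide (x.toNat ≤ c))) := by
      have hswap : (s'.zip t').any (fun ab => decide (ab.1 < ab.2))
          = (t'.zip s').any (fun ab => decide (ab.2 < ab.1)) := by
        rw [← List.zip_swap t' s', List.any_map]
        rfl
      rw [hswap]
      exact any_gt_eq t' s' hlen2.symm hsortT hsortS hbs'
    -- translate the count comparisons to the prefix-sum signs
    have hcountS : ∀ c, s'.countP (fun x => decide (x.toNat ≤ c))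
        = s.toList.countP (fun x => decide (x.toNat ≤ c)) := fun c => hps.countP_eq _
    have hcountT : ∀ c, t'.countP (fun x => decide (x.toNat ≤ c))
        = t.toList.countP (fun x => decide (x.toNat ≤ c)) := fun c => hpt.countP_eq _
    have hneg : decide (∃ c ∈ List.range 128,
          ((List.range (c+1)).map (fun j => diff2.getD j 0)).sum < 0)
        = decide (∃ c ∈ List.range 128,
            s'.countP (fun x => decide (x.toNat ≤ c)) < t'.countP (fun x => decide (x.toNat ≤ c))) := by
      rw [decide_eq_decide]
      apply exists_congr; intro c
      constructor
      · rintro ⟨hcm, h⟩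
        have hc := List.mem_range.mp hcm
        rw [hpre c hc] at h
        refine ⟨hcm, ?_⟩
        rw [hcountS, hcountT]
        omega
      · rintro ⟨hcm, h⟩
        have hc := List.mem_range.mp hcm
        rw [hcountS, hcountT] at h
        refine ⟨hcm, ?_⟩
        rw [hpre c hc]
        omega
    have hpos : decide (∃ c ∈ List.range 128,
          0 < ((List.range (c+1)).map (fun j => diff2.getD j 0)).sum)
        = decide (∃ c ∈ List.range 128,
            t'.countP (fun x => decide (x.toNat ≤ c)) < s'.countP (fun x => decide (x.toNat ≤ c))) := by
      rw [decide_eq_decide]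
      apply exists_congr; intro c
      constructor
      · rintro ⟨hcm, h⟩
        have hc := List.mem_range.mp hcm
        rw [hpre c hc] at h
        refine ⟨hcm, ?_⟩
        rw [hcountS, hcountT]
        omega
      · rintro ⟨hcm, h⟩
        have hc := List.mem_range.mp hcm
        rw [hcountS, hcountT] at h
        refine ⟨hcm, ?_⟩
        rw [hpre c hc]
        omega
    have hgB : decide (∃ c ∈ List.range 128,
          ((List.range (c+1)).map (fun j => diff2.getD j 0)).sum < 0)
        = (s'.zip t').any (fun ab => decide (ab.2 < ab.1)) := hneg.trans hg.symm
    have hlB : decide (∃ c ∈ List.range 128,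
          0 < ((List.range (c+1)).map (fun j => diff2.getD j 0)).sum)
        = (s'.zip t').any (fun ab => decide (ab.1 < ab.2)) := hpos.trans hl.symm
    rw [hgB, hlB]
    cases hgv : (s'.zip t').any (fun ab => decide (ab.2 < ab.1)) <;>
      cases hlv : (s'.zip t').any (fun ab => decide (ab.1 < ab.2)) <;>
      simp
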